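-- pv_equiv track=rewrite | github.com/AndreaFalanti/popnas | src/utils/legacy_feature_utils.py | build_legacy_feature_names
-- ===== SOURCE A (Python) =====
-- def build_legacy_feature_names(max_blocks: int):
--     ''' LEGACY: POPNASv1 features, based mainly on cell specification and using categorical inputs. Has an extra "data_augmented" field. '''
--     # create the complete headers row of the CSV files
--     time_csv_headers = ['time', 'blocks']
--     time_header_types, acc_header_types = ['Label', 'Num'], ['Label', 'Num']
--
--     # create headers for csv files
--     for b in range(1, max_blocks + 1):
--         a = b * 2
--         c = a - 1
--         time_csv_headers.extend([f"input_{c}", f"operation_{c}", f"input_{a}", f"operation_{a}"])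
--         time_header_types.extend(['Categ', 'Num', 'Categ', 'Num'])
--         acc_header_types.extend(['Categ', 'Categ', 'Categ', 'Categ'])
--
--     # deep copy substituting first element (y column)
--     # deep copy could be not necessary, but better than fighting with side-effect later on
--     acc_csv_headers = ['acc'] + [header for header in time_csv_headers[1:]]
--
--     # extra boolean field that simply state if the entry has been generated from data augmentation (False for original samples).
--     # this field will be dropped during training, so it is not relevant for algorithms (catboost drops 'Auxiliary' header_type).
--     time_csv_headers.append('data_augmented')
--     time_header_types.append('Auxiliary')
--     acc_csv_headers.append('data_augmented')
--     acc_header_types.append('Auxiliary')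
--
--     return time_csv_headers, time_header_types, acc_csv_headers, acc_header_types
-- ===== SOURCE B (Python) =====
-- def build_legacy_feature_names(max_blocks: int):
--     # Build each of the four lists independently: names by one flat comprehension
--     # over 1..2*max_blocks, type rows by closed-form list multiplication.
--     per_block_names = [name
--                        for i in range(1, 2 * max_blocks + 1)
--                        for name in (f"input_{i}", f"operation_{i}")]
--     time_csv_headers = ['time', 'blocks'] + per_block_names + ['data_augmented']
--     acc_csv_headers = ['acc', 'blocks'] + per_block_names + ['data_augmented']
--     time_header_types = ['Label', 'Num'] + ['Categ', 'Num'] * (2 * max_blocks) + ['Auxiliary']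
--     acc_header_types = ['Label', 'Num'] + ['Categ'] * (4 * max_blocks) + ['Auxiliary']
--     return time_csv_headers, time_header_types, acc_csv_headers, acc_header_types
-- ===== Notes on version B (the rewrite author's own statement) =====
-- stated objective: simpler
-- what changed: Replaces the single interleaved per-block loop mutating three lists with four independent constructions: a flat comprehension over 1..2*max_blocks for the names and closed-form list multiplication for the two type rows.
import Mathlib
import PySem

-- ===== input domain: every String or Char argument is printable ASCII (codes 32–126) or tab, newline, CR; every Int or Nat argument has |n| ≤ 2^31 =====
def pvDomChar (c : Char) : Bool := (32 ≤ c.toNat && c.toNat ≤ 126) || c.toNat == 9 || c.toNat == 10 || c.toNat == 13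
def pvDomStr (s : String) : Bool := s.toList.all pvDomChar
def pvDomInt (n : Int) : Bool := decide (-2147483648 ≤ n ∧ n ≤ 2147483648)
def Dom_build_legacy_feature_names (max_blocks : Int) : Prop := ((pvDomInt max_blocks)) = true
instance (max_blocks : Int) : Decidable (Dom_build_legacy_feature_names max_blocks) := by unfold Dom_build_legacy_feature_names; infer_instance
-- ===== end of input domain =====

-- B builds the four lists independently (flat name comprehension + closed-form type rows)
-- instead of A's single interleaved per-block loop; objective: simpler.

-- ===== PORT A =====
def build_legacy_feature_names (max_blocks : Int) : List String × List String × List String × List String :=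
  let time_csv_headers : List String := ["time", "blocks"]
  let time_header_types : List String := ["Label", "Num"]
  let acc_header_types : List String := ["Label", "Num"]
  let st :=
    (PySem.List.pyRange 1 (max_blocks + 1) 1).foldl
      (fun (st : List String × List String × List String) b =>
        let a := b * 2
        let c := a - 1
        (st.1 ++ ["input_" ++ PySem.Int.toStr c, "operation_" ++ PySem.Int.toStr c,
                  "input_" ++ PySem.Int.toStr a, "operation_" ++ PySem.Int.toStr a],
         st.2.1 ++ ["Categ", "Num", "Categ", "Num"],
         st.2.2 ++ ["Categ", "Categ", "Categ", "Categ"]))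
      (time_csv_headers, time_header_types, acc_header_types)
  let time_csv_headers := st.1
  let time_header_types := st.2.1
  let acc_header_types := st.2.2
  let acc_csv_headers : List String :=
    ["acc"] ++ (PySem.List.slice time_csv_headers (some 1) none).map (fun header => header)
  let time_csv_headers := time_csv_headers ++ ["data_augmented"]
  let time_header_types := time_header_types ++ ["Auxiliary"]
  let acc_csv_headers := acc_csv_headers ++ ["data_augmented"]
  let acc_header_types := acc_header_types ++ ["Auxiliary"]
  (time_csv_headers, time_header_types, acc_csv_headers, acc_header_types)

-- ===== PORT B =====
def build_legacy_feature_names_alt (max_blocks : Int) : List String × List String × List String × List String :=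
  let per_block_names : List String :=
    (PySem.List.pyRange 1 (2 * max_blocks + 1) 1).flatMap
      (fun i => ["input_" ++ PySem.Int.toStr i, "operation_" ++ PySem.Int.toStr i])
  let time_csv_headers := ["time", "blocks"] ++ per_block_names ++ ["data_augmented"]
  let acc_csv_headers := ["acc", "blocks"] ++ per_block_names ++ ["data_augmented"]
  -- Python list * n (n ≤ 0 gives []) = flatten/replicate with .toNat
  let time_header_types := ["Label", "Num"]
      ++ (List.replicate (2 * max_blocks).toNat (["Categ", "Num"] : List String)).flatten
      ++ ["Auxiliary"]
  let acc_header_types := ["Label", "Num"]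
      ++ List.replicate (4 * max_blocks).toNat "Categ"
      ++ ["Auxiliary"]
  (time_csv_headers, time_header_types, acc_csv_headers, acc_header_types)

-- ===== PRECONDITION & SPEC =====
def Spec_build_legacy_feature_names (max_blocks : Int) (out : List String × List String × List String × List String) : Prop := out = build_legacy_feature_names_alt max_blocks
instance (max_blocks : Int) (out : List String × List String × List String × List String) : Decidable (Spec_build_legacy_feature_names max_blocks out) := by unfold Spec_build_legacy_feature_names; infer_instance

-- ===== CLAIM (what is proved, stated in full; the proofs are below) =====
def Claim_equal_build_legacy_feature_names : Prop := ∀ (max_blocks : Int), Dom_build_legacy_feature_names max_blocks → Spec_build_legacy_feature_names max_blocks (build_legacy_feature_names max_blocks)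

-- ===== LEMMAS AND PROOFS =====

def pvStep : List String × List String × List String → Int → List String × List String × List String :=
  fun st b =>
    let a := b * 2
    let c := a - 1
    (st.1 ++ ["input_" ++ PySem.Int.toStr c, "operation_" ++ PySem.Int.toStr c,
              "input_" ++ PySem.Int.toStr a, "operation_" ++ PySem.Int.toStr a],
     st.2.1 ++ ["Categ", "Num", "Categ", "Num"],
     st.2.2 ++ ["Categ", "Categ", "Categ", "Categ"])

def pvNames (m : Int) : List String :=
  (PySem.List.pyRange 1 (2 * m + 1) 1).flatMap
    (fun i => ["input_" ++ PySem.Int.toStr i, "operation_" ++ PySem.Int.toStr i])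

lemma pvNames_succ (n : Nat) :
    pvNames ((n : Int) + 1) =
      pvNames (n : Int) ++
        ["input_" ++ PySem.Int.toStr (2 * (n : Int) + 1),
         "operation_" ++ PySem.Int.toStr (2 * (n : Int) + 1),
         "input_" ++ PySem.Int.toStr (2 * (n : Int) + 2),
         "operation_" ++ PySem.Int.toStr (2 * (n : Int) + 2)] := by
  unfold pvNames
  have h1 : (1 : Int) ≤ 2 * (n : Int) + 1 := by omega
  have h2 : 2 * (n : Int) + 1 ≤ 2 * ((n : Int) + 1) + 1 := by omega
  rw [PySem.List.pyRange_one_append 1 (2 * (n : Int) + 1) (2 * ((n : Int) + 1) + 1) h1 h2]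
  rw [PySem.List.pyRange_one_cons (by omega : 2 * (n : Int) + 1 < 2 * ((n : Int) + 1) + 1)]
  rw [PySem.List.pyRange_one_cons (by omega : 2 * (n : Int) + 1 + 1 < 2 * ((n : Int) + 1) + 1)]
  rw [PySem.List.pyRange_one_eq_nil (by omega : 2 * ((n : Int) + 1) + 1 ≤ 2 * (n : Int) + 1 + 1 + 1)]
  have e : 2 * (n : Int) + 1 + 1 = 2 * (n : Int) + 2 := by ring
  simp [List.flatMap_append, e]

lemma pvLoop (n : Nat) :
    (PySem.List.pyRange 1 ((n : Int) + 1) 1).foldl pvStep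
        (["time", "blocks"], ["Label", "Num"], ["Label", "Num"]) =
      (["time", "blocks"] ++ pvNames (n : Int),
       ["Label", "Num"] ++ (List.replicate (2 * n) (["Categ", "Num"] : List String)).flatten,
       ["Label", "Num"] ++ List.replicate (4 * n) "Categ") := by
  induction n with
  | zero =>
      rw [PySem.List.pyRange_one_eq_nil (by omega)]
      unfold pvNames
      rw [PySem.List.pyRange_one_eq_nil (by omega)]
      simp
  | succ k ih =>
      have hc : ((k : Int) + 1 : Int) + 1 = ((k : Int) + 1) + 1 := rfl
      have : (PySem.List.pyRange 1 (((k + 1 : Nat) : Int) + 1) 1) =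
          PySem.List.pyRange 1 ((k : Int) + 1) 1 ++ [(k : Int) + 1] := by
        push_cast
        exact PySem.List.pyRange_one_succ_right (by omega)
      rw [this, List.foldl_append, ih]
      show pvStep _ _ = _
      unfold pvStep
      have e1 : ((k : Int) + 1) * 2 - 1 = 2 * (k : Int) + 1 := by ring
      have e2 : ((k : Int) + 1) * 2 = 2 * (k : Int) + 2 := by ring
      have e3 : 2 * (k + 1) = 2 * k + 2 := by omega
      have e4 : 4 * (k + 1) = 4 * k + 4 := by omega
      push_cast
      have e0 : 2 * (k:Int) + 2 - 1 = 2 * (k:Int) + 1 := by ring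
      simp only [e0, e2, e3, e4, List.replicate_add, List.flatten_append,
        pvNames_succ k, List.append_assoc]
      simp

theorem pv_main (max_blocks : Int) :
    build_legacy_feature_names max_blocks = build_legacy_feature_names_alt max_blocks := by
  by_cases h : max_blocks ≤ 0
  · unfold build_legacy_feature_names build_legacy_feature_names_alt
    rw [PySem.List.pyRange_one_eq_nil (by omega : max_blocks + 1 ≤ 1),
        PySem.List.pyRange_one_eq_nil (by omega : 2 * max_blocks + 1 ≤ 1)]
    have h2 : (2 * max_blocks).toNat = 0 := by omega
    have h4 : (4 * max_blocks).toNat = 0 := by omega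
    simp [h2, h4, PySem.List.slice_from_one]
  · obtain ⟨n, rfl⟩ : ∃ n : Nat, max_blocks = (n : Int) :=
      ⟨max_blocks.toNat, (Int.toNat_of_nonneg (by omega)).symm⟩
    unfold build_legacy_feature_names build_legacy_feature_names_alt
    have := pvLoop n
    simp only [show (PySem.List.pyRange 1 ((n : Int) + 1) 1).foldl
        (fun (st : List String × List String × List String) b =>
          (st.1 ++ ["input_" ++ PySem.Int.toStr (b * 2 - 1), "operation_" ++ PySem.Int.toStr (b * 2 - 1),
                    "input_" ++ PySem.Int.toStr (b * 2), "operation_" ++ PySem.Int.toStr (b * 2)],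
           st.2.1 ++ ["Categ", "Num", "Categ", "Num"],
           st.2.2 ++ ["Categ", "Categ", "Categ", "Categ"]))
        (["time", "blocks"], ["Label", "Num"], ["Label", "Num"]) =
        (["time", "blocks"] ++ pvNames (n : Int),
         ["Label", "Num"] ++ (List.replicate (2 * n) (["Categ", "Num"] : List String)).flatten,
         ["Label", "Num"] ++ List.replicate (4 * n) "Categ") from this]
    have h2 : (2 * (n : Int)).toNat = 2 * n := by omega
    have h4 : (4 * (n : Int)).toNat = 4 * n := by omega
    simp [PySem.List.slice_from_one, pvNames, h2, h4]

-- ===== VERDICT (by name: the statement is the Claim_ definition above) =====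
theorem build_legacy_feature_names_spec : Claim_equal_build_legacy_feature_names := by
  intro mb _
  unfold Spec_build_legacy_feature_names
  exact pv_main mb
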